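-- pv_equiv track=rewrite | github.com/jvictorkap/BTC_v2 | ajuste_mesas.py | qtd_dist
-- ===== SOURCE A (Python) =====
-- def qtd_dist(row):
--
--     if abs(row)>1000000:
--         if row>0:
--             return [100000 for i in range(abs(int(row/100000)))]
--         else:
--             return [-100000 for i in range(abs(int(row/100000)))]
--
--     if abs(row)>100000:
--         if row>0:
--             return [10000 for i in range(abs(int(row/10000)))]
--         else:
--             return [-10000 for i in range(abs(int(row/10000)))]
--     if abs(row)>10000:
--         if row>0:
--             return [1000 for i in range(abs(int(row/1000)))]
--         else:
--             return [-1000 for i in range(abs(int(row/1000)))]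
--     elif abs(row)>1000:
--         if row>0:
--             return [100 for i in range(abs(int(row/100)))]
--         else:
--             return [-100 for i in range(abs(int(row/100)))]
--     # elif abs(row)>100:
--     #     if row>0:
--     #         return [10 for i in range(abs(int(row/10)))]
--     #     else:
--     #         return [-10 for i in range(abs(int(row/10)))]
--     else:
--         if row>0:
--             return [1 for i in range(abs(int(row)))]
--         else:
--             return [-1 for i in range(abs(int(row)))]
-- ===== SOURCE B (Python) =====
-- # Different algorithm: compute the step from the decimal magnitude of |row|-1
-- # (integer log10 by repeated division) and emit the chunks by greedy subtraction,
-- # instead of A's threshold ladder + range comprehension.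
-- def qtd_dist(row):
--     m = abs(row)
--     if m <= 1000:
--         step = 1
--     else:
--         k = 0
--         t = m - 1
--         while t >= 10:
--             t //= 10
--             k += 1
--         step = 10 ** min(k - 1, 5)
--     unit = step if row > 0 else -step
--     out = []
--     r = m
--     while r >= step:
--         out.append(unit)
--         r -= step
--     return out
-- ===== Notes on version B (the rewrite author's own statement) =====
-- stated objective: alternative
-- what changed: Replaces A's per-magnitude threshold ladder of five duplicated range-comprehension branches by a different algorithm: the step is derived from the decimal magnitude of |row|-1 (integer log10 computed by repeated division, then 10**min(k-1,5)), and the output list is produced by greedy subtraction of the step from |row| instead of counting and comprehending over a range.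
import Mathlib
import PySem

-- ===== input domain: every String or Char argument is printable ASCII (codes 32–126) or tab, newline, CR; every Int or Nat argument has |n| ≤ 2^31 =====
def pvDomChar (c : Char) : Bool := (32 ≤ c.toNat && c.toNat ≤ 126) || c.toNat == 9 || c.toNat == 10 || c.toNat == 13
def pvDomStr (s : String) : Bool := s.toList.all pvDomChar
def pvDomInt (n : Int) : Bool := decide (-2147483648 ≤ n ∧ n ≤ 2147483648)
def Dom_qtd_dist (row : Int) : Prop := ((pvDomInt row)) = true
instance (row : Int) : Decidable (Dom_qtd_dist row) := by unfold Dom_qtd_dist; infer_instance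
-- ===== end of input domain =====

-- B derives the step from the decimal magnitude of |row|-1 (integer log10 by repeated
-- division) and emits the list by greedy subtraction — an alternative algorithm to A's
-- threshold ladder of range comprehensions; same cost.

-- ===== PORT A =====
-- literal transliteration: `int(row/step)` is trunc-toward-zero division, exact on Dom
-- via PySem.Int.truncdiv; each comprehension over range(n) is a map over pyRange.
def qtd_dist (row : Int) : List Int :=
  if |row| > 1000000 then
    if row > 0 then
      (PySem.List.pyRange 0 (|PySem.Int.truncdiv row 100000|) 1).map (fun _ => (100000 : Int))
    else
      (PySem.List.pyRange 0 (|PySem.Int.truncdiv row 100000|) 1).map (fun _ => (-100000 : Int))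
  else if |row| > 100000 then
    if row > 0 then
      (PySem.List.pyRange 0 (|PySem.Int.truncdiv row 10000|) 1).map (fun _ => (10000 : Int))
    else
      (PySem.List.pyRange 0 (|PySem.Int.truncdiv row 10000|) 1).map (fun _ => (-10000 : Int))
  else if |row| > 10000 then
    if row > 0 then
      (PySem.List.pyRange 0 (|PySem.Int.truncdiv row 1000|) 1).map (fun _ => (1000 : Int))
    else
      (PySem.List.pyRange 0 (|PySem.Int.truncdiv row 1000|) 1).map (fun _ => (-1000 : Int))
  else if |row| > 1000 then
    if row > 0 then
      (PySem.List.pyRange 0 (|PySem.Int.truncdiv row 100|) 1).map (fun _ => (100 : Int))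
    else
      (PySem.List.pyRange 0 (|PySem.Int.truncdiv row 100|) 1).map (fun _ => (-100 : Int))
  else
    if row > 0 then
      (PySem.List.pyRange 0 (|row|) 1).map (fun _ => (1 : Int))
    else
      (PySem.List.pyRange 0 (|row|) 1).map (fun _ => (-1 : Int))

-- ===== PORT B =====
-- B's `while t >= 10: t //= 10; k += 1` loop (Python // = floordiv = ediv on t ≥ 10 > 0).
def pvLog (t : Int) : Nat :=
  if h : 10 ≤ t then pvLog (PySem.Int.floordiv t 10) + 1 else 0
termination_by t.toNat
decreasing_by
  simp only [PySem.Int.floordiv]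
  have h1 : t.fdiv 10 = t / 10 := by rw [Int.fdiv_eq_ediv]; simp
  omega

-- B's `while r >= step: out.append(unit); r -= step` loop
-- (the `0 < step` conjunct is a totality guard only; B always calls it with step ≥ 1).
def pvGreedy (step unit r : Int) : List Int :=
  if _h : step ≤ r ∧ 0 < step then unit :: pvGreedy step unit (r - step) else []
termination_by r.toNat
decreasing_by omega

def qtd_dist_alt (row : Int) : List Int :=
  let m := |row|
  let step := if m ≤ 1000 then (1 : Int) else (10 : Int) ^ (min (pvLog (m - 1) - 1) 5)
  let unit := if row > 0 then step else -step
  pvGreedy step unit m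

-- ===== PRECONDITION & SPEC =====
def Spec_qtd_dist (row : Int) (out : List Int) : Prop := out = qtd_dist_alt row
instance (row : Int) (out : List Int) : Decidable (Spec_qtd_dist row out) := by unfold Spec_qtd_dist; infer_instance

-- ===== CLAIM (what is proved, stated in full; the proofs are below) =====
def Claim_equal_qtd_dist : Prop := ∀ (row : Int), Dom_qtd_dist row → Spec_qtd_dist row (qtd_dist row)

-- ===== LEMMAS AND PROOFS =====

-- the log loop viewed through ediv
lemma pvLog_eq (t : Int) : pvLog t = if 10 ≤ t then pvLog (t / 10) + 1 else 0 := by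
  rw [pvLog]
  split_ifs with h
  · have h1 : t.fdiv 10 = t / 10 := by rw [Int.fdiv_eq_ediv]; simp
    simp [PySem.Int.floordiv, h1]
  · rfl

lemma pvLog_ge (j : Nat) (t : Int) (h : (10 : Int) ^ j ≤ t) : j ≤ pvLog t := by
  induction j generalizing t with
  | zero => omega
  | succ j ih =>
    have hp : (1 : Int) ≤ 10 ^ j := one_le_pow₀ (by norm_num)
    have h10 : (10 : Int) ≤ t := by nlinarith [pow_succ (10 : Int) j]
    rw [pvLog_eq, if_pos h10]
    have : (10 : Int) ^ j ≤ t / 10 := by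
      rw [Int.le_ediv_iff_mul_le (by norm_num)]
      calc (10:Int) ^ j * 10 = 10 ^ (j+1) := by ring
        _ ≤ t := h
    have := ih _ this
    omega

lemma pvLog_lt (j : Nat) (t : Int) (h : t < (10 : Int) ^ (j + 1)) : pvLog t ≤ j := by
  induction j generalizing t with
  | zero =>
    rw [pvLog_eq, if_neg (by simpa using by omega : ¬ (10 : Int) ≤ t)]
  | succ j ih =>
    rw [pvLog_eq]
    split_ifs with h10
    · have : t / 10 < (10 : Int) ^ (j + 1) := by
        rw [Int.ediv_lt_iff_lt_mul (by norm_num)]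
        calc t < 10 ^ (j + 1 + 1) := h
          _ = 10 ^ (j+1) * 10 := by ring
      have := ih _ this
      omega
    · omega

lemma pvLog_range (j : Nat) (t : Int) (h1 : (10 : Int) ^ j ≤ t) (h2 : t < (10 : Int) ^ (j + 1)) :
    pvLog t = j :=
  le_antisymm (pvLog_lt j t h2) (pvLog_ge j t h1)

-- the greedy loop produces exactly ⌊r / s⌋ copies of u (s > 0, r ≥ 0)
lemma pvGreedy_eq (s u : Int) (hs : 0 < s) (r : Int) (hr : 0 ≤ r) :
    pvGreedy s u r = List.replicate (r / s).toNat u := by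
  induction hn : r.toNat using Nat.strong_induction_on generalizing r with
  | _ n ih =>
    rw [pvGreedy]
    split_ifs with h
    · have hq : r / s = (r - s) / s + 1 := by
        have := Int.add_mul_ediv_right (r - s) 1 (by omega : s ≠ 0)
        simpa [sub_add_cancel] using this
      have hnn : 0 ≤ (r - s) / s := Int.ediv_nonneg (by omega) hs.le
      have : pvGreedy s u (r - s) = List.replicate ((r - s) / s).toNat u :=
        ih (r - s).toNat (by omega) (r - s) (by omega) rfl
      rw [this, hq]
      have : ((r - s) / s + 1).toNat = ((r - s) / s).toNat + 1 := by omega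
      rw [this, List.replicate_succ]
    · have : r / s = 0 := Int.ediv_eq_zero_of_lt hr (by omega)
      simp [this]

-- trunc division of row matches ediv of |row| for a positive divisor.
lemma abs_tdiv_eq (a s : Int) (hs : 0 < s) : |a.tdiv s| = |a| / s := by
  by_cases h : 0 ≤ a
  · rw [abs_of_nonneg h, abs_of_nonneg (Int.tdiv_nonneg h hs.le), Int.tdiv_eq_ediv_of_nonneg h]
  · have h2 : a.tdiv s = -((-a).tdiv s) := by rw [Int.neg_tdiv, neg_neg]
    rw [h2, abs_neg, abs_of_neg (by omega : a < 0),
      abs_of_nonneg (Int.tdiv_nonneg (by omega) hs.le), Int.tdiv_eq_ediv_of_nonneg (by omega)]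

-- A's branch for step s equals a replicate of the quotient of |row| by s.
lemma branch_eq (row s v : Int) (hs : 0 < s) :
    (PySem.List.pyRange 0 (|PySem.Int.truncdiv row s|) 1).map (fun _ => v)
      = List.replicate (|row| / s).toNat v := by
  rw [List.map_const', PySem.List.length_pyRange_one]
  rw [show |PySem.Int.truncdiv row s| - 0 = |row.tdiv s| from by
    simp [PySem.Int.truncdiv]]
  rw [abs_tdiv_eq row s hs]

-- B with the step pinned to a concrete value on each magnitude range
lemma alt_eq_of_step (row s : Int) (hs : 0 < s)
    (hstep : (if |row| ≤ 1000 then (1 : Int)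
              else (10 : Int) ^ (min (pvLog (|row| - 1) - 1) 5)) = s) :
    qtd_dist_alt row = List.replicate (|row| / s).toNat (if row > 0 then s else -s) := by
  unfold qtd_dist_alt
  simp only [hstep]
  split_ifs with hp <;> exact pvGreedy_eq s _ hs |row| (abs_nonneg row)

-- ===== VERDICT (by name: the statement is the Claim_ definition above) =====
theorem qtd_dist_spec : Claim_equal_qtd_dist := by
  intro row hdom
  show qtd_dist row = qtd_dist_alt row
  have hdom' : |row| ≤ 2147483648 := by
    unfold Dom_qtd_dist pvDomInt at hdom
    have h := of_decide_eq_true hdom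
    rw [abs_le]; omega
  unfold qtd_dist
  by_cases h1 : |row| > (1000000 : Int)
  · have hlog : 6 ≤ pvLog (|row| - 1) := pvLog_ge 6 _ (by norm_num; omega)
    rw [alt_eq_of_step row 100000 (by norm_num)
      (by rw [if_neg (by omega)]
          have : min (pvLog (|row| - 1) - 1) 5 = 5 := by omega
          rw [this]; norm_num)]
    rw [if_pos h1]
    by_cases hp : row > 0
    · rw [if_pos hp, if_pos hp, branch_eq row 100000 _ (by norm_num)]
    · rw [if_neg hp, if_neg hp, branch_eq row 100000 _ (by norm_num)]
  · rw [if_neg h1]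
    by_cases h2 : |row| > (100000 : Int)
    · have hlog : pvLog (|row| - 1) = 5 := pvLog_range 5 _ (by norm_num; omega) (by norm_num; omega)
      rw [alt_eq_of_step row 10000 (by norm_num)
        (by rw [if_neg (by omega), hlog]; norm_num)]
      rw [if_pos h2]
      by_cases hp : row > 0
      · rw [if_pos hp, if_pos hp, branch_eq row 10000 _ (by norm_num)]
      · rw [if_neg hp, if_neg hp, branch_eq row 10000 _ (by norm_num)]
    · rw [if_neg h2]
      by_cases h3 : |row| > (10000 : Int)
      · have hlog : pvLog (|row| - 1) = 4 := pvLog_range 4 _ (by norm_num; omega) (by norm_num; omega)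
        rw [alt_eq_of_step row 1000 (by norm_num)
          (by rw [if_neg (by omega), hlog]; norm_num)]
        rw [if_pos h3]
        by_cases hp : row > 0
        · rw [if_pos hp, if_pos hp, branch_eq row 1000 _ (by norm_num)]
        · rw [if_neg hp, if_neg hp, branch_eq row 1000 _ (by norm_num)]
      · rw [if_neg h3]
        by_cases h4 : |row| > (1000 : Int)
        · have hlog : pvLog (|row| - 1) = 3 := pvLog_range 3 _ (by norm_num; omega) (by norm_num; omega)
          rw [alt_eq_of_step row 100 (by norm_num)
            (by rw [if_neg (by omega), hlog]; norm_num)]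
          rw [if_pos h4]
          by_cases hp : row > 0
          · rw [if_pos hp, if_pos hp, branch_eq row 100 _ (by norm_num)]
          · rw [if_neg hp, if_neg hp, branch_eq row 100 _ (by norm_num)]
        · rw [alt_eq_of_step row 1 (by norm_num) (by rw [if_pos (by omega)])]
          rw [if_neg h4]
          by_cases hp : row > 0
          · rw [if_pos hp, if_pos hp, List.map_const', PySem.List.length_pyRange_one]
            simp
          · rw [if_neg hp, if_neg hp, List.map_const', PySem.List.length_pyRange_one]
            simp
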